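-- pv_equiv track=rewrite | github.com/tringuyen180303/TIP102-CodePath | unit2/session1/find_travelers.py | find_travelers
-- ===== SOURCE A (Python) =====
-- def find_travelers(anomalies):
--     # Dictionary to store the count of anomalies for each traveler
--     anomaly_count = {}
--
--     for traveler, anomaly in anomalies:
--         if traveler in anomaly_count:
--             anomaly_count[traveler] += 1
--         else:
--             anomaly_count[traveler] = 1
--
--     # Lists to store travelers with zero and exactly one anomaly
--     no_anomalies = []
--     one_anomaly = []
--
--     # Consider only travelers that have experienced at least one anomaly
--     for traveler, count in anomaly_count.items():
--         if count == 1: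
--             one_anomaly.append(traveler)
--         elif count == 0:
--             no_anomalies.append(traveler)
--
--     # Sort the lists
--     no_anomalies.sort()
--     one_anomaly.sort()
--
--     return [no_anomalies, one_anomaly]
-- ===== SOURCE B (Python) =====
-- def find_travelers(anomalies):
--     names = sorted(t for t, _ in anomalies)
--     result = []
--     while names:
--         head = names[0]
--         rest = names[1:]
--         k = 0
--         while k < len(rest) and rest[k] == head:
--             k += 1
--         if k == 0:
--             result.append(head)
--         names = rest[k:]
--     return [[], result]
-- ===== Notes on version B (the rewrite author's own statement) =====
-- stated objective: alternative
-- what changed: B replaces A's count dictionary plus item-filtering pass plus sort of the filtered names by a single sort of the traveler names followed by one run-length scan that emits travelers whose run has length exactly 1.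
import Mathlib
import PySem

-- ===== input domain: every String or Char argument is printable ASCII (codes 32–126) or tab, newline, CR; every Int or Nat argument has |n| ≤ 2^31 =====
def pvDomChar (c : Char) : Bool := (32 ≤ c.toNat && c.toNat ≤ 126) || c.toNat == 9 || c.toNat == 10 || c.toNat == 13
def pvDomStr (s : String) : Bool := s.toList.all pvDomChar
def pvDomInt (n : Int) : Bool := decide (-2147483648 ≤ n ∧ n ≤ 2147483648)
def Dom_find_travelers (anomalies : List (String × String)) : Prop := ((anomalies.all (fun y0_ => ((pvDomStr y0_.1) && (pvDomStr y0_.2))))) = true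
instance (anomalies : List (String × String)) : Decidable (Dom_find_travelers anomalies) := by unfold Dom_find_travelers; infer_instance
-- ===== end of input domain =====

-- B sorts the traveler names once and finds the exactly-once travelers by a single run-length
-- scan over the sorted list, instead of A's count dictionary plus a filtering pass plus a sort
-- of the filtered names (objective: alternative decomposition, no counting dictionary).

-- ===== PORT A =====
-- literal transliteration of A: build the count dict, split the items into the two
-- lists (the count == 0 branch included, as in the source), sort both, return the pair.
def find_travelers (anomalies : List (String × String)) : List (List String) :=
  let anomaly_count : PySem.Dict String Int :=
    anomalies.foldl (fun d p =>
      if d.contains p.1 then d.modify p.1 0 (· + 1) else d.insert p.1 1) PySem.Dict.empty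
  let pair : List String × List String :=
    anomaly_count.items.foldl (fun acc p =>
      if p.2 == 1 then (acc.1, acc.2 ++ [p.1])
      else if p.2 == 0 then (acc.1 ++ [p.1], acc.2) else acc) ([], [])
  [PySem.List.sorted pair.1 (fun x => x), PySem.List.sorted pair.2 (fun x => x)]

-- ===== PORT B =====
-- B's outer while-loop over the still-unprocessed suffix of the sorted name list; the inner
-- counting loop 'while k < len(rest) and rest[k] == head: k += 1' computes exactly the length
-- of the maximal prefix of `rest` equal to `head`, ported as (takeWhile (· == head)).length.
def pvRunsOnce : List String → List String
  | [] => []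
  | h :: t =>
      let k := (t.takeWhile (fun x => x == h)).length
      (if k = 0 then [h] else []) ++ pvRunsOnce (t.drop k)
  termination_by l => l.length
  decreasing_by simp

def find_travelers_alt (anomalies : List (String × String)) : List (List String) :=
  let names := PySem.List.sorted (anomalies.map (fun p => p.1)) (fun x => x)
  [[], pvRunsOnce names]

-- ===== PRECONDITION & SPEC =====
def Spec_find_travelers (anomalies : List (String × String)) (out : List (List String)) : Prop := out = find_travelers_alt anomalies
instance (anomalies : List (String × String)) (out : List (List String)) : Decidable (Spec_find_travelers anomalies out) := by unfold Spec_find_travelers; infer_instance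

-- ===== CLAIM (what is proved, stated in full; the proofs are below) =====
def Claim_equal_find_travelers : Prop := ∀ (anomalies : List (String × String)), Dom_find_travelers anomalies → Spec_find_travelers anomalies (find_travelers anomalies)

-- ===== LEMMAS AND PROOFS =====

-- drop (length of takeWhile) is dropWhile
lemma pv_drop_takeWhile (p : String → Bool) (l : List String) :
    List.drop (List.takeWhile p l).length l = List.dropWhile p l := by
  induction l with
  | nil => simp
  | cons h t ih => by_cases hp : p h <;> simp [hp, ih]

lemma pv_dropWhile_head_false (p : String → Bool) (l : List String) (x : String)
    (t : List String) (h : List.dropWhile p l = x :: t) : p x = false := by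
  have := List.head?_dropWhile_not p l
  rw [h] at this; simpa using this

-- every element of the dropWhile (· == h) part of a sorted tail is strictly above h
lemma pv_dropWhile_gt (h : String) (t : List String)
    (hs : (h :: t).Pairwise (· ≤ ·)) :
    ∀ x ∈ List.dropWhile (fun x => x == h) t, h < x := by
  intro x hx
  have hxt : x ∈ t := List.Sublist.subset (List.dropWhile_sublist _) hx
  have hle : h ≤ x := (List.pairwise_cons.mp hs).1 x hxt
  rcases heq : List.dropWhile (fun x => x == h) t with _ | ⟨d, dt⟩
  · rw [heq] at hx; simp at hx
  · rw [heq] at hx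
    have hd : (d == h) = false := pv_dropWhile_head_false (fun x => x == h) t d dt heq
    have hdh : d ≠ h := by simpa using hd
    -- t = takeWhile ++ (d :: dt), so d ≤ every element of dt
    have ht' : t = List.takeWhile (fun x => x == h) t ++ (d :: dt) := by
      rw [← heq, List.takeWhile_append_dropWhile]
    have hdmem : d ∈ t := by rw [ht']; simp
    have hdle : h ≤ d := (List.pairwise_cons.mp hs).1 d hdmem
    have hdlt : h < d := lt_of_le_of_ne hdle (Ne.symm hdh)
    rcases List.mem_cons.mp hx with hx | hx
    · exact hx ▸ hdlt
    · have hpt : t.Pairwise (· ≤ ·) := (List.pairwise_cons.mp hs).2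
      rw [ht'] at hpt
      have := (List.pairwise_append.mp hpt).2.1
      have hdx : d ≤ x := (List.pairwise_cons.mp this).1 x hx
      exact lt_of_lt_of_le hdlt hdx

-- membership in the run-length scan of a sorted list: exactly the names occurring once
lemma pv_runs_mem_aux (n : Nat) : ∀ (l : List String), l.length ≤ n → l.Pairwise (· ≤ ·) →
    ∀ x, x ∈ pvRunsOnce l ↔ (x ∈ l ∧ l.count x = 1) := by
  induction n with
  | zero =>
    intro l hlen _ x
    rw [List.length_eq_zero_iff.mp (Nat.le_zero.mp hlen)]
    simp [pvRunsOnce]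
  | succ n ihn =>
    intro l hlen hs x
    match l with
    | [] => simp [pvRunsOnce]
    | h :: t =>
    obtain ⟨k, hk⟩ : ∃ k, (List.takeWhile (fun x => x == h) t).length = k := ⟨_, rfl⟩
    have htw : ∀ y ∈ List.takeWhile (fun x => x == h) t, y = h := by
      intro y hy; simpa using List.mem_takeWhile_imp hy
    have hdrop : t.drop k = List.dropWhile (fun x => x == h) t := by
      rw [← hk]; exact pv_drop_takeWhile _ _
    have hgt : ∀ y ∈ t.drop k, h < y := by rw [hdrop]; exact pv_dropWhile_gt h t hs
    have hsplit : t = List.takeWhile (fun x => x == h) t ++ t.drop k := by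
      rw [hdrop, List.takeWhile_append_dropWhile]
    have hps : (t.drop k).Pairwise (· ≤ ·) := by
      have hpt : t.Pairwise (· ≤ ·) := (List.pairwise_cons.mp hs).2
      rw [hsplit] at hpt
      exact (List.pairwise_append.mp hpt).2.1
    have hlen' : (t.drop k).length ≤ n := by
      simp at hlen ⊢
      omega
    have ihx := ihn (t.drop k) hlen' hps
    have hcnt_tw : (List.takeWhile (fun x => x == h) t).count h = k := by
      rw [List.count_eq_length.mpr (fun b hb => (htw b hb).symm), hk]
    have hnot_h : h ∉ t.drop k := fun hmem => lt_irrefl h (hgt h hmem)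
    have hcnt_h : (h :: t).count h = 1 + k := by
      rw [List.count_cons_self]
      conv_lhs => rw [hsplit]
      rw [List.count_append, hcnt_tw, List.count_eq_zero.mpr hnot_h]
      omega
    rw [pvRunsOnce]
    simp only [hk]
    by_cases hxh : x = h
    · subst hxh
      constructor
      · intro hmem
        refine ⟨List.mem_cons_self, ?_⟩
        rw [hcnt_h]
        simp at hmem
        rcases hmem with ⟨hk0, _⟩ | hmem
        · omega
        · exact absurd ((ihx x).mp hmem).1 hnot_h
      · intro ⟨_, hc⟩
        rw [hcnt_h] at hc
        have hk0 : k = 0 := by omega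
        rw [if_pos hk0]
        simp
    · have hxt_tw : x ∉ List.takeWhile (fun y => y == h) t := fun hmem => hxh (htw x hmem)
      have hcx : (h :: t).count x = (t.drop k).count x := by
        rw [List.count_cons_of_ne (Ne.symm hxh)]
        conv_lhs => rw [hsplit]
        rw [List.count_append, List.count_eq_zero.mpr hxt_tw]
        omega
      have hxmem : x ∈ h :: t ↔ x ∈ t.drop k := by
        constructor
        · intro hmem
          rcases List.mem_cons.mp hmem with hx | hx
          · exact absurd hx hxh
          · rw [hsplit] at hx
            rcases List.mem_append.mp hx with hx | hx
            · exact absurd (htw x hx) hxh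
            · exact hx
        · intro hmem
          exact List.mem_cons_of_mem h (by rw [hsplit]; exact List.mem_append_right _ hmem)
      constructor
      · intro hmem
        simp [hxh] at hmem
        obtain ⟨hx1, hx2⟩ := (ihx x).mp hmem
        exact ⟨hxmem.mpr hx1, by rw [hcx]; exact hx2⟩
      · intro ⟨hm, hc⟩
        have hin : x ∈ pvRunsOnce (t.drop k) :=
          (ihx x).mpr ⟨hxmem.mp hm, by rw [← hcx]; exact hc⟩
        simp [hin]

lemma pv_runs_mem (l : List String) (hs : l.Pairwise (· ≤ ·)) :
    ∀ x, x ∈ pvRunsOnce l ↔ (x ∈ l ∧ l.count x = 1) :=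
  pv_runs_mem_aux l.length l (le_refl _) hs

-- the run-length scan of a sorted list is strictly increasing
lemma pv_runs_pairwise_aux (n : Nat) : ∀ (l : List String), l.length ≤ n → l.Pairwise (· ≤ ·) →
    (pvRunsOnce l).Pairwise (· < ·) := by
  induction n with
  | zero =>
    intro l hlen _
    rw [List.length_eq_zero_iff.mp (Nat.le_zero.mp hlen)]
    simp [pvRunsOnce]
  | succ n ihn =>
    intro l hlen hs
    match l with
    | [] => simp [pvRunsOnce]
    | h :: t =>
    obtain ⟨k, hk⟩ : ∃ k, (List.takeWhile (fun x => x == h) t).length = k := ⟨_, rfl⟩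
    have hdrop : t.drop k = List.dropWhile (fun x => x == h) t := by
      rw [← hk]; exact pv_drop_takeWhile _ _
    have hgt : ∀ y ∈ t.drop k, h < y := by rw [hdrop]; exact pv_dropWhile_gt h t hs
    have hsplit : t = List.takeWhile (fun x => x == h) t ++ t.drop k := by
      rw [hdrop, List.takeWhile_append_dropWhile]
    have hps : (t.drop k).Pairwise (· ≤ ·) := by
      have hpt : t.Pairwise (· ≤ ·) := (List.pairwise_cons.mp hs).2
      rw [hsplit] at hpt
      exact (List.pairwise_append.mp hpt).2.1
    have hlen' : (t.drop k).length ≤ n := by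
      simp at hlen ⊢
      omega
    have ihp := ihn (t.drop k) hlen' hps
    rw [pvRunsOnce]
    simp only [hk]
    by_cases hkz : k = 0
    · rw [if_pos hkz]
      simp only [List.singleton_append, List.pairwise_cons]
      refine ⟨?_, ihp⟩
      intro y hy
      exact hgt y ((pv_runs_mem_aux n (t.drop k) hlen' hps y).mp hy).1
    · rw [if_neg hkz]
      simpa using ihp

lemma pv_runs_pairwise (l : List String) (hs : l.Pairwise (· ≤ ·)) :
    (pvRunsOnce l).Pairwise (· < ·) :=
  pv_runs_pairwise_aux l.length l (le_refl _) hs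

-- A's guarded counting loop builds exactly Counter(names)
lemma pvA_dict (anomalies : List (String × String)) :
    anomalies.foldl (fun d p =>
        if d.contains p.1 then d.modify p.1 0 (· + 1) else d.insert p.1 1) PySem.Dict.empty
      = PySem.Dict.counter (anomalies.map (fun p => p.1)) := by
  rw [PySem.Dict.counter_eq_foldl, List.foldl_map]
  apply List.foldl_ext
  intro d p _
  by_cases hc : d.contains p.1
  · rw [if_pos hc]
  · rw [if_neg hc]
    simp [PySem.Dict.modify, PySem.Dict.getD_of_not_contains d 0 (Bool.of_not_eq_true hc)]

-- A's splitting loop over the counter items: the count == 0 branch never fires,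
-- the count == 1 branch collects the filter
lemma pvA_pairfold (names : List String) (ks : List String) (hks : ∀ k ∈ ks, k ∈ names) :
    ∀ (a b : List String),
    ((ks.map (fun k => (k, (names.count k : Int)))).foldl (fun acc p =>
        if p.2 == 1 then (acc.1, acc.2 ++ [p.1])
        else if p.2 == 0 then (acc.1 ++ [p.1], acc.2) else acc) (a, b))
      = (a, b ++ ks.filter (fun k => names.count k == 1)) := by
  induction ks with
  | nil => intro a b; simp
  | cons k ks ih =>
    intro a b
    have hkmem : k ∈ names := hks k List.mem_cons_self
    have hpos : 0 < names.count k := List.count_pos_iff.mpr hkmem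
    have hks' : ∀ k' ∈ ks, k' ∈ names := fun k' hk' => hks k' (List.mem_cons_of_mem k hk')
    by_cases h1 : names.count k = 1
    · have hb1 : ((names.count k : Int) == 1) = true := by simp [h1]
      simp only [List.map_cons, List.foldl_cons, hb1, if_true, List.filter_cons]
      rw [ih hks' a (b ++ [k])]
      simp [h1]
    · have hb1 : ((names.count k : Int) == 1) = false := by
        simp only [beq_eq_false_iff_ne, ne_eq]
        exact_mod_cast h1
      have hb0 : ((names.count k : Int) == 0) = false := by
        simp only [beq_eq_false_iff_ne, ne_eq]
        exact_mod_cast Nat.pos_iff_ne_zero.mp hpos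
      have hbn : (names.count k == 1) = false := by simpa using h1
      simp only [List.map_cons, List.foldl_cons, hb1, hb0, Bool.false_eq_true, if_false, List.filter_cons, hbn]
      rw [ih hks' a b]

-- ===== VERDICT (by name: the statement is the Claim_ definition above) =====
theorem find_travelers_spec : Claim_equal_find_travelers := by
  intro anomalies _
  unfold Spec_find_travelers
  simp only [find_travelers, find_travelers_alt]
  rw [pvA_dict, PySem.Dict.items_counter]
  have hmemks : ∀ k ∈ PySem.Set.ofList (anomalies.map (fun p => p.1)),
      k ∈ anomalies.map (fun p => p.1) :=
    fun k hk => (PySem.Set.mem_ofList _ k).mp hk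
  rw [pvA_pairfold (anomalies.map (fun p => p.1)) _ hmemks [] []]
  simp only [List.nil_append]
  -- sorted [] = []
  have hnil : PySem.List.sorted ([] : List String) (fun x => x) = [] := rfl
  rw [hnil]
  -- the sorted filtered keys are exactly B's run-length scan of the sorted names
  set names := anomalies.map (fun p => p.1) with hnames
  have hS : (PySem.List.sorted names (fun x => x)).Pairwise (· ≤ ·) :=
    PySem.List.sorted_pairwise names (fun x => x)
  have hSperm : (PySem.List.sorted names (fun x => x)).Perm names :=
    PySem.List.sorted_perm names (fun x => x) false
  have hrp : (pvRunsOnce (PySem.List.sorted names (fun x => x))).Pairwise (· < ·) :=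
    pv_runs_pairwise _ hS
  have hnd1 : (pvRunsOnce (PySem.List.sorted names (fun x => x))).Nodup :=
    hrp.imp ne_of_lt
  have hnd2 : ((PySem.Set.ofList names).filter (fun k => names.count k == 1)).Nodup :=
    List.Nodup.filter _ (PySem.Set.nodup_ofList names)
  have hperm : (pvRunsOnce (PySem.List.sorted names (fun x => x))).Perm
      ((PySem.Set.ofList names).filter (fun k => names.count k == 1)) := by
    rw [List.perm_ext_iff_of_nodup hnd1 hnd2]
    intro a
    rw [pv_runs_mem _ hS a, List.mem_filter]
    rw [PySem.List.mem_sorted, hSperm.count_eq a, PySem.Set.mem_ofList]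
    simp
  rw [PySem.List.sorted_eq_of_perm_of_pairwise_lt _ _ (fun x => x) hperm hrp]
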